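-- pv_equiv track=rewrite | github.com/Zhangmiaohan-986/VDAC | rm_node_sort_node.py | rm_empty_node
-- ===== SOURCE A (Python) =====
-- from collections import defaultdict
-- from collections import defaultdict
--
-- def rm_empty_node(customer_plan, vehicle_route):
--     """
--     移除车辆路线中不存在无人机任务的节点
--
--     Args:
--         customer_plan: 客户计划字典 {mission_tuple: assignment_info}
--         vehicle_route: 车辆路线列表 [vehicle_route1, vehicle_route2, ...]
--
--     Returns:
--         tuple: (filtered_vehicle_route, empty_nodes_by_vehicle)
--             - filtered_vehicle_route: 过滤后的车辆路线
--             - empty_nodes_by_vehicle: 按车辆ID组织的空节点列表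
--     """
--     # 初始化结果数据结构
--     filtered_vehicle_route = []
--     empty_nodes_by_vehicle = defaultdict(list)
--
--     # 遍历每个车辆的路线
--     for num_index, route in enumerate(vehicle_route):
--         vehicle_id = num_index + 1
--
--         # 获取该车辆路线中的节点（不包括起点和终点）
--         task_route = route[1:-1] if len(route) > 2 else []
--
--         # 收集该车辆上所有无人机任务的发射和回收节点
--         mission_nodes = set()
--
--         # 遍历所有无人机任务
--         for mission_tuple in customer_plan.values():
--             drone_id, launch_node, customer_node, recovery_node, launch_vehicle, recovery_vehicle = mission_tuple
--
--             # 检查发射车辆和回收车辆是否相同，且都等于当前车辆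
--             if launch_vehicle == vehicle_id or recovery_vehicle == vehicle_id:
--                 # 如果发射节点在车辆路线上，则保留
--                 if launch_node in task_route:
--                     mission_nodes.add(launch_node)
--
--                 # 如果回收节点在车辆路线上，则保留
--                 if recovery_node in task_route:
--                     mission_nodes.add(recovery_node)
--
--         # 找出不存在无人机任务的节点
--         empty_nodes = [node for node in task_route if node not in mission_nodes]
--         empty_nodes_by_vehicle[vehicle_id] = empty_nodes
--
--         # 构建过滤后的车辆路线
--         # 保留起点
--         filtered_route = [route[0]]
--
--         # 只保留有无人机任务的节点
--         for node in task_route: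
--             if node in mission_nodes:
--                 filtered_route.append(node)
--
--         # 保留终点
--         if len(route) > 1:
--             filtered_route.append(route[-1])
--
--         filtered_vehicle_route.append(filtered_route)
--
--     return filtered_vehicle_route, dict(empty_nodes_by_vehicle)
-- ===== SOURCE B (Python) =====
-- def rm_empty_node(customer_plan, vehicle_route):
--     # Bucket candidate launch/recovery nodes per vehicle once, then one pass per route.
--     buckets = {}
--     for _, launch_node, _, recovery_node, launch_vehicle, recovery_vehicle in customer_plan.values():
--         for v in (launch_vehicle, recovery_vehicle):
--             nodes = buckets.setdefault(v, set())
--             nodes.add(launch_node)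
--             nodes.add(recovery_node)
--
--     def process(v, route):
--         cand = buckets.get(v, set())
--         inner = route[1:-1] if len(route) > 2 else []
--         tail = [route[-1]] if len(route) > 1 else []
--         kept = [route[0]] + [n for n in inner if n in cand] + tail
--         return kept, (v, [n for n in inner if n not in cand])
--
--     results = [process(i + 1, r) for i, r in enumerate(vehicle_route)]
--     return [f for f, _ in results], dict(e for _, e in results)
-- ===== Notes on version B (the rewrite author's own statement) =====
-- stated objective: faster
-- what changed: Instead of rescanning every mission for every vehicle and testing membership in the route list, B buckets each mission's candidate launch/recovery nodes per vehicle once into a dict of sets, then does a single set-membership pass over each route.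
import Mathlib
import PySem

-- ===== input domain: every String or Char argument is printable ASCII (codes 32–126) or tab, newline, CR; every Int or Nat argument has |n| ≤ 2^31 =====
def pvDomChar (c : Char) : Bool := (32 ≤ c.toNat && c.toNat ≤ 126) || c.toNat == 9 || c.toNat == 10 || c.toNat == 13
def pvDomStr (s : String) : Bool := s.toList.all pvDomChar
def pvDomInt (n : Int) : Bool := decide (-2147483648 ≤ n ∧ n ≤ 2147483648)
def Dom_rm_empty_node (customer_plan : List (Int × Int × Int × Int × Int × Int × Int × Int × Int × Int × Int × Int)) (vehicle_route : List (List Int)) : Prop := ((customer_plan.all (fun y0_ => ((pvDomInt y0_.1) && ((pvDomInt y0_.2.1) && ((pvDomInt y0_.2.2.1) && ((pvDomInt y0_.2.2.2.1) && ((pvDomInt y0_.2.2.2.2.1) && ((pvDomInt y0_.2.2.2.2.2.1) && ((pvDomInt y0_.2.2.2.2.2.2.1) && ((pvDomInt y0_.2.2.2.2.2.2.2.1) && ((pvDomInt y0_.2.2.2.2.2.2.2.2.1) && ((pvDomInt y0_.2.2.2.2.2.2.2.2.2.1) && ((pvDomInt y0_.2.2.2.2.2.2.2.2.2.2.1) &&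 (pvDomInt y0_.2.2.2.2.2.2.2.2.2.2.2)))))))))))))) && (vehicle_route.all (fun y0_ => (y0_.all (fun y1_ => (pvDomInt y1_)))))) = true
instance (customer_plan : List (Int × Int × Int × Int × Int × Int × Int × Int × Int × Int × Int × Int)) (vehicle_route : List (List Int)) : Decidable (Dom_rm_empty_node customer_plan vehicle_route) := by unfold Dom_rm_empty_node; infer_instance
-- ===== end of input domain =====

-- ===== PORT A =====
-- B is faster: it buckets each mission's candidate nodes per vehicle once (dict of sets),
-- replacing A's per-vehicle rescan of all missions with list-membership tests.
-- Shared input decoding: customer_plan is a Python dict {6-tuple key: 6-tuple value};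
-- .values() = values of the dict built from the association list (duplicate keys overwrite).
def pvVals (customer_plan : List (Int × Int × Int × Int × Int × Int × Int × Int × Int × Int × Int × Int)) :
    List (Int × Int × Int × Int × Int × Int) :=
  (PySem.Dict.ofList (customer_plan.map (fun m =>
    ((m.1, m.2.1, m.2.2.1, m.2.2.2.1, m.2.2.2.2.1, m.2.2.2.2.2.1), m.2.2.2.2.2.2)))).values

-- A's loop body for one (index, route) pair: (filtered_route, empty_nodes)
def pvRouteA (customer_plan : List (Int × Int × Int × Int × Int × Int × Int × Int × Int × Int × Int × Int))
    (p : Int × List Int) : List Int × List Int :=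
  let vehicle_id : Int := p.1 + 1
  let route := p.2
  let task_route : List Int :=
    if route.length > 2 then PySem.List.slice route (some 1) (some (-1)) else []
  let mission_nodes : PySem.Set Int :=
    (pvVals customer_plan).foldl (fun s m =>
      if m.2.2.2.2.1 == vehicle_id || m.2.2.2.2.2 == vehicle_id then
        let s' := if task_route.contains m.2.1 then PySem.Set.add s m.2.1 else s
        if task_route.contains m.2.2.2.1 then PySem.Set.add s' m.2.2.2.1 else s'
      else s) PySem.Set.empty
  let empty_nodes := task_route.filter (fun n => !(PySem.Set.contains mission_nodes n))
  -- filtered_route = [route[0]]; append nodes with missions; append route[-1] if len > 1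
  let fr1 := task_route.foldl (fun fr n =>
    if PySem.Set.contains mission_nodes n then fr ++ [n] else fr)
    [PySem.List.pyGetD route 0 0]   -- route[0]; total form, Pre_ gives route ≠ []
  ((if route.length > 1 then fr1 ++ [PySem.List.pyGetD route (-1) 0] else fr1), empty_nodes)

def rm_empty_node (customer_plan : List (Int × Int × Int × Int × Int × Int × Int × Int × Int × Int × Int × Int)) (vehicle_route : List (List Int)) : List (List Int) × (List (Int × List Int)) :=
  let res := (PySem.List.enumerate vehicle_route).foldl (fun acc p =>
      (acc.1 ++ [(pvRouteA customer_plan p).1],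
       acc.2.insert (p.1 + 1) (pvRouteA customer_plan p).2))
    (([] : List (List Int)), (PySem.Dict.empty : PySem.Dict Int (List Int)))
  (res.1, res.2.items)

-- ===== PORT B =====
def pvBuckets (customer_plan : List (Int × Int × Int × Int × Int × Int × Int × Int × Int × Int × Int × Int)) :
    PySem.Dict Int (PySem.Set Int) :=
  (pvVals customer_plan).foldl (fun d m =>
    -- nodes = buckets.setdefault(v, set()); nodes.add(launch_node); nodes.add(recovery_node)
    [m.2.2.2.2.1, m.2.2.2.2.2].foldl (fun d w =>
      PySem.Dict.modify d w PySem.Set.empty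
        (fun s => PySem.Set.add (PySem.Set.add s m.2.1) m.2.2.2.1)) d)
    PySem.Dict.empty

def pvProcess (buckets : PySem.Dict Int (PySem.Set Int)) (v : Int) (route : List Int) :
    List Int × (Int × List Int) :=
  let cand := buckets.getD v PySem.Set.empty
  let inner : List Int :=
    if route.length > 2 then PySem.List.slice route (some 1) (some (-1)) else []
  let tail := if route.length > 1 then [PySem.List.pyGetD route (-1) 0] else []
  let kept := [PySem.List.pyGetD route 0 0] ++ inner.filter (fun n => PySem.Set.contains cand n) ++ tail
  (kept, (v, inner.filter (fun n => !(PySem.Set.contains cand n))))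

def rm_empty_node_alt (customer_plan : List (Int × Int × Int × Int × Int × Int × Int × Int × Int × Int × Int × Int)) (vehicle_route : List (List Int)) : List (List Int) × (List (Int × List Int)) :=
  let buckets := pvBuckets customer_plan
  let results := (PySem.List.enumerate vehicle_route).map (fun p => pvProcess buckets (p.1 + 1) p.2)
  -- dict(e for _, e in results): the keys i+1 are distinct, so the dict IS this association list
  (results.map (·.1), results.map (·.2))

-- ===== PRECONDITION & SPEC =====
-- Pre_ excludes exactly the inputs where Python A raises: an empty route makes route[0] an IndexError.
def Pre_rm_empty_node (customer_plan : List (Int × Int × Int × Int × Int × Int × Int × Int × Int × Int × Int × Int)) (vehicle_route : List (List Int)) : Prop :=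
  ∀ r ∈ vehicle_route, r ≠ []
instance (customer_plan : List (Int × Int × Int × Int × Int × Int × Int × Int × Int × Int × Int × Int)) (vehicle_route : List (List Int)) : Decidable (Pre_rm_empty_node customer_plan vehicle_route) := by unfold Pre_rm_empty_node; infer_instance
def pvWitness_rm_empty_node : (List (Int × Int × Int × Int × Int × Int × Int × Int × Int × Int × Int × Int)) × List (List Int) :=
  ([(1, 2, 3, 4, 5, 6, 7, 8, 9, 10, 1, 1)], [[0, 8, 10, 3], [0, 5]])

def Spec_rm_empty_node (customer_plan : List (Int × Int × Int × Int × Int × Int × Int × Int × Int × Int × Int × Int)) (vehicle_route : List (List Int)) (out : List (List Int) × (List (Int × List Int))) : Prop := out = rm_empty_node_alt customer_plan vehicle_route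
instance (customer_plan : List (Int × Int × Int × Int × Int × Int × Int × Int × Int × Int × Int × Int)) (vehicle_route : List (List Int)) (out : List (List Int) × (List (Int × List Int))) : Decidable (Spec_rm_empty_node customer_plan vehicle_route out) := by unfold Spec_rm_empty_node; infer_instance

-- ===== CLAIM (what is proved, stated in full; the proofs are below) =====
def Claim_equal_rm_empty_node : Prop := ∀ (customer_plan : List (Int × Int × Int × Int × Int × Int × Int × Int × Int × Int × Int × Int)) (vehicle_route : List (List Int)), Dom_rm_empty_node customer_plan vehicle_route → Pre_rm_empty_node customer_plan vehicle_route → Spec_rm_empty_node customer_plan vehicle_route (rm_empty_node customer_plan vehicle_route)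

-- ===== LEMMAS AND PROOFS =====

-- Membership in A's per-route mission_nodes set.
set_option maxHeartbeats 1000000 in
lemma mem_missionA (vals : List (Int × Int × Int × Int × Int × Int)) (vid : Int) (tr : List Int) :
    ∀ (s : PySem.Set Int) (x : Int),
    x ∈ vals.foldl (fun s m =>
          if m.2.2.2.2.1 == vid || m.2.2.2.2.2 == vid then
            let s' := if tr.contains m.2.1 then PySem.Set.add s m.2.1 else s
            if tr.contains m.2.2.2.1 then PySem.Set.add s' m.2.2.2.1 else s'
          else s) s
      ↔ x ∈ s ∨ ∃ m ∈ vals, (m.2.2.2.2.1 = vid ∨ m.2.2.2.2.2 = vid) ∧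
          ((x = m.2.1 ∧ m.2.1 ∈ tr) ∨ (x = m.2.2.2.1 ∧ m.2.2.2.1 ∈ tr)) := by
  induction vals with
  | nil => simp
  | cons m rest ih =>
    intro s x
    rw [List.foldl_cons, ih]
    by_cases h1 : m.2.2.2.2.1 = vid <;> by_cases h2 : m.2.2.2.2.2 = vid <;>
      by_cases h3 : m.2.1 ∈ tr <;> by_cases h4 : m.2.2.2.1 ∈ tr <;>
      simp [h1, h2, h3, h4, PySem.Set.mem_add, or_assoc]

-- One step of B's bucket-building loop (the two modifies for one mission).
lemma mem_getD_step (m : Int × Int × Int × Int × Int × Int) (d : PySem.Dict Int (PySem.Set Int)) (v x : Int) :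
    x ∈ ([m.2.2.2.2.1, m.2.2.2.2.2].foldl (fun d w =>
          PySem.Dict.modify d w PySem.Set.empty
            (fun s => PySem.Set.add (PySem.Set.add s m.2.1) m.2.2.2.1)) d).getD v PySem.Set.empty
      ↔ x ∈ d.getD v PySem.Set.empty ∨
          ((v = m.2.2.2.2.1 ∨ v = m.2.2.2.2.2) ∧ (x = m.2.1 ∨ x = m.2.2.2.1)) := by
  simp only [List.foldl_cons, List.foldl_nil, PySem.Dict.getD_modify]
  by_cases h1 : v = m.2.2.2.2.1 <;> by_cases h2 : v = m.2.2.2.2.2 <;>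
    by_cases h3 : m.2.2.2.2.2 = m.2.2.2.2.1 <;>
    simp_all [PySem.Set.mem_add, or_assoc]

-- Membership in B's buckets for a given vehicle.
set_option maxHeartbeats 1000000 in
lemma mem_bucketsB (vals : List (Int × Int × Int × Int × Int × Int)) :
    ∀ (d : PySem.Dict Int (PySem.Set Int)) (v x : Int),
    x ∈ (vals.foldl (fun d m =>
          [m.2.2.2.2.1, m.2.2.2.2.2].foldl (fun d w =>
            PySem.Dict.modify d w PySem.Set.empty
              (fun s => PySem.Set.add (PySem.Set.add s m.2.1) m.2.2.2.1)) d) d).getD v PySem.Set.empty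
      ↔ x ∈ d.getD v PySem.Set.empty ∨ ∃ m ∈ vals, (v = m.2.2.2.2.1 ∨ v = m.2.2.2.2.2) ∧
          (x = m.2.1 ∨ x = m.2.2.2.1) := by
  induction vals with
  | nil => simp
  | cons m rest ih =>
    intro d v x
    rw [List.foldl_cons, ih, mem_getD_step, List.exists_mem_cons_iff]
    exact or_assoc

-- On nodes of the route interior, A's mission_nodes set and B's bucket agree.
lemma contains_eq (cp : List (Int × Int × Int × Int × Int × Int × Int × Int × Int × Int × Int × Int))
    (vid : Int) (tr : List Int) (n : Int) (hn : n ∈ tr) :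
    PySem.Set.contains ((pvVals cp).foldl (fun s m =>
          if m.2.2.2.2.1 == vid || m.2.2.2.2.2 == vid then
            let s' := if tr.contains m.2.1 then PySem.Set.add s m.2.1 else s
            if tr.contains m.2.2.2.1 then PySem.Set.add s' m.2.2.2.1 else s'
          else s) PySem.Set.empty) n
      = PySem.Set.contains ((pvBuckets cp).getD vid PySem.Set.empty) n := by
  apply Bool.eq_iff_iff.mpr
  rw [PySem.Set.contains_iff, PySem.Set.contains_iff]
  unfold pvBuckets
  rw [mem_missionA, mem_bucketsB]
  simp only [PySem.Dict.getD_empty]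
  constructor
  · rintro (h | ⟨m, hm, hv, (⟨rfl, ht⟩ | ⟨rfl, ht⟩)⟩)
    · simp at h
    · exact Or.inr ⟨m, hm, hv.imp Eq.symm Eq.symm, Or.inl rfl⟩
    · exact Or.inr ⟨m, hm, hv.imp Eq.symm Eq.symm, Or.inr rfl⟩
  · rintro (h | ⟨m, hm, hv, (rfl | rfl)⟩)
    · simp at h
    · exact Or.inr ⟨m, hm, hv.imp Eq.symm Eq.symm, Or.inl ⟨rfl, hn⟩⟩
    · exact Or.inr ⟨m, hm, hv.imp Eq.symm Eq.symm, Or.inr ⟨rfl, hn⟩⟩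

lemma filter_pos_eq (cp : List (Int × Int × Int × Int × Int × Int × Int × Int × Int × Int × Int × Int))
    (vid : Int) (tr : List Int) :
    tr.filter (fun n => PySem.Set.contains ((pvVals cp).foldl (fun s m =>
          if m.2.2.2.2.1 == vid || m.2.2.2.2.2 == vid then
            let s' := if tr.contains m.2.1 then PySem.Set.add s m.2.1 else s
            if tr.contains m.2.2.2.1 then PySem.Set.add s' m.2.2.2.1 else s'
          else s) PySem.Set.empty) n)
      = tr.filter (fun n => PySem.Set.contains ((pvBuckets cp).getD vid PySem.Set.empty) n) :=
  List.filter_congr (fun n hn => contains_eq cp vid tr n hn)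

lemma filter_neg_eq (cp : List (Int × Int × Int × Int × Int × Int × Int × Int × Int × Int × Int × Int))
    (vid : Int) (tr : List Int) :
    tr.filter (fun n => !(PySem.Set.contains ((pvVals cp).foldl (fun s m =>
          if m.2.2.2.2.1 == vid || m.2.2.2.2.2 == vid then
            let s' := if tr.contains m.2.1 then PySem.Set.add s m.2.1 else s
            if tr.contains m.2.2.2.1 then PySem.Set.add s' m.2.2.2.1 else s'
          else s) PySem.Set.empty) n))
      = tr.filter (fun n => !(PySem.Set.contains ((pvBuckets cp).getD vid PySem.Set.empty) n)) :=
  List.filter_congr (fun n hn => by rw [contains_eq cp vid tr n hn])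

-- Per-route agreement of the two ports' bodies.
lemma routeA_eq (cp : List (Int × Int × Int × Int × Int × Int × Int × Int × Int × Int × Int × Int))
    (p : Int × List Int) :
    pvRouteA cp p
      = ((pvProcess (pvBuckets cp) (p.1 + 1) p.2).1, (pvProcess (pvBuckets cp) (p.1 + 1) p.2).2.2) := by
  simp only [pvRouteA, pvProcess]
  rw [PySem.List.foldl_append_if_eq_filter]
  rw [filter_pos_eq cp (p.1 + 1), filter_neg_eq cp (p.1 + 1)]
  simp only [Prod.mk.injEq]
  refine ⟨?_, by simp⟩
  split_ifs <;> simp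

-- ===== VERDICT (by name: the statement is the Claim_ definition above) =====
theorem rm_empty_node_spec : Claim_equal_rm_empty_node := by
  intro cp vr _ _
  unfold Spec_rm_empty_node
  simp only [rm_empty_node, rm_empty_node_alt]
  rw [PySem.List.foldl_prod_mk
    (f := fun (L : List (List Int)) (p : Int × List Int) => L ++ [(pvRouteA cp p).1])
    (g := fun (d : PySem.Dict Int (List Int)) (p : Int × List Int) =>
      d.insert (p.1 + 1) (pvRouteA cp p).2)]
  rw [PySem.List.foldl_append_singleton_eq_map]
  have hnd : (List.map (fun (p : Int × List Int) => p.1 + 1) (PySem.List.enumerate vr)).Nodup :=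
    List.pairwise_map.mpr ((PySem.List.pairwise_lt_enumerate vr 0).imp (fun h => by omega))
  rw [PySem.Dict.items_foldl_insert_fresh (PySem.List.enumerate vr)
    (fun (p : Int × List Int) => p.1 + 1) (fun p => (pvRouteA cp p).2) PySem.Dict.empty
    (fun a _ => PySem.Dict.contains_empty _) hnd]
  have hempty : (PySem.Dict.empty : PySem.Dict Int (List Int)).items = [] := rfl
  simp [Prod.ext_iff, List.map_map, routeA_eq, pvProcess, hempty, Function.comp]
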